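-- pv_equiv track=rewrite | github.com/toannguyen58/model | kbb_scraper/scrapers/bodytype_detector.py | should_process_separately
-- ===== SOURCE A (Python) =====
-- from typing import List, Dict, Tuple, Optional
--
-- def should_process_separately(categorized_tabs: Dict[str, List[str]]) -> bool:
--     """
--     Determine if different body types should be processed separately
--     Now also checks if tabs actually have different data
--     """
--     # If we have multiple distinct body types
--     distinct_bodytypes = [bt for bt in categorized_tabs.keys() if bt != 'default']
--
--     if len(distinct_bodytypes) > 1:
--         # Additional check: if tabs within same category are actually different
--         for body_type, tabs in categorized_tabs.items():
--             if len(tabs) > 1: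
--                 # Check if tabs with same body type name might actually be different
--                 tab_keywords = [t.lower().split() for t in tabs]
--                 if len(set(tuple(t) for t in tab_keywords)) > 1:
--                     return True
--         return True
--
--     return False
-- ===== SOURCE B (Python) =====
-- def should_process_separately(categorized_tabs):
--     return sum(1 for bt in categorized_tabs if bt != 'default') > 1
-- ===== Notes on version B (the rewrite author's own statement) =====
-- stated objective: simpler
-- what changed: B replaces the filtered key list plus the nested per-category set-building scan (which is dead code: that branch returns True regardless) with a single count of non-'default' keys compared against 1.
import Mathlib
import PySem

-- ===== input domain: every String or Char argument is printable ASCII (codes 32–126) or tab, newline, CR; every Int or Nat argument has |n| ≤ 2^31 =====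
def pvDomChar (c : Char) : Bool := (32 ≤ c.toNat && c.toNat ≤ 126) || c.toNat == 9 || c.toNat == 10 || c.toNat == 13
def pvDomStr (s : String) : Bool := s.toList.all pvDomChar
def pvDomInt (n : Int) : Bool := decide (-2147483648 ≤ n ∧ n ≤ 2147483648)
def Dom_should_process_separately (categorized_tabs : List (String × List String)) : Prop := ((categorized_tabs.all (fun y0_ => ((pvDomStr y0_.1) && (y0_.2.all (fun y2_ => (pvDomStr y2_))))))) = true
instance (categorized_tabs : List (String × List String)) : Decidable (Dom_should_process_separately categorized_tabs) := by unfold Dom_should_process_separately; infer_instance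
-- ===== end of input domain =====

-- B (simpler): returns whether the count of non-'default' keys exceeds 1, dropping A's filtered key list and its dead inner scan (that branch returns True regardless).


-- ===== PORT A =====
-- the inner for-loop of A: returns True early on a category with >1 distinct keyword lists, else True at the end
def spsLoop : List (String × List String) → Bool
  | [] => true
  | (_, tabs) :: rest =>
    if tabs.length > 1 then
      let tab_keywords := tabs.map (fun t => PySem.Str.split₀ (PySem.Str.lower t))
      if (PySem.Set.ofList tab_keywords).length > 1 then true
      else spsLoop rest
    else spsLoop rest

def should_process_separately (categorized_tabs : List (String × List String)) : Bool :=
  let distinct_bodytypes := (categorized_tabs.map Prod.fst).filter (fun bt => bt ≠ "default")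
  if distinct_bodytypes.length > 1 then spsLoop categorized_tabs
  else false

-- ===== PORT B =====
-- B: count of non-'default' keys exceeds 1 (the inner loop of A is dead code)
def should_process_separately_alt (categorized_tabs : List (String × List String)) : Bool :=
  decide (categorized_tabs.countP (fun p => p.1 != "default") > 1)

-- ===== PRECONDITION & SPEC =====
def Spec_should_process_separately (categorized_tabs : List (String × List String)) (out : Bool) : Prop := out = should_process_separately_alt categorized_tabs
instance (categorized_tabs : List (String × List String)) (out : Bool) : Decidable (Spec_should_process_separately categorized_tabs out) := by unfold Spec_should_process_separately; infer_instance

-- ===== CLAIM (what is proved, stated in full; the proofs are below) =====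
def Claim_equal_should_process_separately : Prop := ∀ (categorized_tabs : List (String × List String)), Dom_should_process_separately categorized_tabs → Spec_should_process_separately categorized_tabs (should_process_separately categorized_tabs)

-- ===== LEMMAS AND PROOFS =====

-- ===== VERDICT (by name: the statement is the Claim_ definition above) =====
theorem spsLoop_true (l : List (String × List String)) : spsLoop l = true := by
  induction l with
  | nil => rfl
  | cons h t ih => cases h; simp [spsLoop, ih]

theorem sps_count_eq (ct : List (String × List String)) :
    ((ct.map Prod.fst).filter (fun bt => bt ≠ "default")).length
      = ct.countP (fun p => p.1 != "default") := by
  induction ct with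
  | nil => rfl
  | cons h t ih =>
    cases h with
    | mk k v =>
      simp only [decide_not] at ih
      by_cases hk : k = "default" <;> simp [hk, ih]

theorem should_process_separately_spec : Claim_equal_should_process_separately := by
  intro ct _
  unfold Spec_should_process_separately should_process_separately should_process_separately_alt
  simp only [spsLoop_true, sps_count_eq]
  split_ifs with h <;> simp [h]
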